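-- pv_equiv track=rewrite | github.com/naoki2222/spatical_scan | src/CircularScan.py | Z_data
-- ===== SOURCE A (Python) =====
-- def Z_data(list_Z,line_G,commit_G):
--
--     n_Z = 0
--     c_Z = 0
--
--     for i in range(len(list_Z)):
--         for j in range(len(line_G)):
--             if list_Z[i] == line_G[j][0]:
--                 n_Z = line_G[j][1] + n_Z
--
--
--     for i in range(len(list_Z)):
--         for j in range(len(commit_G)):
--             if list_Z[i] == commit_G[j][0]:
--                 c_Z = commit_G[j][1] + c_Z
--
--     return n_Z,c_Z
-- ===== SOURCE B (Python) =====
-- def Z_data(list_Z, line_G, commit_G):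
--     cnt = {}
--     for z in list_Z:
--         cnt[z] = cnt.get(z, 0) + 1
--
--     def weighted(g):
--         if not g:
--             return 0
--         (k, v) = g[0]
--         return v * cnt.get(k, 0) + weighted(g[1:])
--
--     return weighted(line_G), weighted(commit_G)
-- ===== Notes on version B (the rewrite author's own statement) =====
-- stated objective: faster
-- what changed: Replaces A's two nested Z-against-G scans by a frequency dict of list_Z built once plus a recursive weighted sum over each G list (adding v * multiplicity), removing the inner scan.
import Mathlib
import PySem

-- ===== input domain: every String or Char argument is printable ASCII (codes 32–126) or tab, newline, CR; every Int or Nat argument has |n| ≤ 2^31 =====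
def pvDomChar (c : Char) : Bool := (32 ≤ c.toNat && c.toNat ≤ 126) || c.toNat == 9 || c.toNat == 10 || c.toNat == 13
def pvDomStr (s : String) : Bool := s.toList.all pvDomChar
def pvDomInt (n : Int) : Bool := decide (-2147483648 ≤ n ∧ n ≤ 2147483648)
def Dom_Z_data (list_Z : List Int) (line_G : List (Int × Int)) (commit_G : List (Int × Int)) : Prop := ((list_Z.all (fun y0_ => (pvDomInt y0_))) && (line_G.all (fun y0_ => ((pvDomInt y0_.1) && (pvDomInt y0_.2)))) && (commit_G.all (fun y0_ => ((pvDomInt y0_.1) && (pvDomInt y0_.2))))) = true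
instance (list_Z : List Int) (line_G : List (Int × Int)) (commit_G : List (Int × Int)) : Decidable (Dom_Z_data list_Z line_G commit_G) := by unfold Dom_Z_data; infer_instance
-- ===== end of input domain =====

-- B builds a frequency dict of list_Z once and sums v * multiplicity recursively over each G list (objective: faster).

-- ===== PORT A =====
-- A: two nested loops; for each z in list_Z scan the whole G list and accumulate matching values.
def Z_data (list_Z : List Int) (line_G : List (Int × Int)) (commit_G : List (Int × Int)) : Int × Int :=
  let n_Z : Int := list_Z.foldl (fun acc z =>
    line_G.foldl (fun a p => if z = p.1 then p.2 + a else a) acc) 0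
  let c_Z : Int := list_Z.foldl (fun acc z =>
    commit_G.foldl (fun a p => if z = p.1 then p.2 + a else a) acc) 0
  (n_Z, c_Z)

-- ===== PORT B =====
-- Source B's recursive helper: weighted(g) = v * cnt.get(k, 0) + weighted(rest)
def Z_weighted (cnt : PySem.Dict Int Int) : List (Int × Int) → Int
  | [] => 0
  | (k, v) :: rest => v * cnt.getD k 0 + Z_weighted cnt rest

-- B: cnt = {}; for z in list_Z: cnt[z] = cnt.get(z, 0) + 1; then weighted over each G list.
def Z_data_alt (list_Z : List Int) (line_G : List (Int × Int)) (commit_G : List (Int × Int)) : Int × Int :=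
  let cnt := list_Z.foldl (fun d z => d.insert z (d.getD z 0 + 1)) PySem.Dict.empty
  (Z_weighted cnt line_G, Z_weighted cnt commit_G)

-- ===== PRECONDITION & SPEC =====
def Spec_Z_data (list_Z : List Int) (line_G : List (Int × Int)) (commit_G : List (Int × Int)) (out : Int × Int) : Prop := out = Z_data_alt list_Z line_G commit_G
instance (list_Z : List Int) (line_G : List (Int × Int)) (commit_G : List (Int × Int)) (out : Int × Int) : Decidable (Spec_Z_data list_Z line_G commit_G out) := by unfold Spec_Z_data; infer_instance

-- ===== CLAIM =====
def Claim_equal_Z_data : Prop := ∀ (list_Z : List Int) (line_G : List (Int × Int)) (commit_G : List (Int × Int)), Dom_Z_data list_Z line_G commit_G → Spec_Z_data list_Z line_G commit_G (Z_data list_Z line_G commit_G)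

-- ===== LEMMAS AND PROOFS =====

-- the contribution of one z against the whole list g
def oneZ (g : List (Int × Int)) (z : Int) : Int :=
  (g.map (fun p => if z = p.1 then p.2 else 0)).sum

lemma inner_foldl (g : List (Int × Int)) (z : Int) (acc : Int) :
    g.foldl (fun a p => if z = p.1 then p.2 + a else a) acc = acc + oneZ g z := by
  induction g generalizing acc with
  | nil => simp [oneZ]
  | cons p g ih =>
    simp only [List.foldl_cons, oneZ, List.map_cons, List.sum_cons]
    rw [ih]
    split_ifs <;> simp [oneZ] <;> ring

lemma outer_foldl (l : List Int) (g : List (Int × Int)) (init : Int) :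
    l.foldl (fun acc z => g.foldl (fun a p => if z = p.1 then p.2 + a else a) acc) init
      = init + (l.map (oneZ g)).sum := by
  induction l generalizing init with
  | nil => simp
  | cons z l ih =>
    simp only [List.foldl_cons, List.map_cons, List.sum_cons]
    rw [ih, inner_foldl]
    ring

lemma weighted_eq_sum (l : List Int) (g : List (Int × Int)) :
    Z_weighted (l.foldl (fun d z => d.insert z (d.getD z 0 + 1)) PySem.Dict.empty) g
      = (g.map (fun p => p.2 * (l.count p.1 : Int))).sum := by
  rw [PySem.Dict.foldl_insert_getD_add_one_eq_counter]
  induction g with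
  | nil => simp [Z_weighted]
  | cons p g ih =>
    cases p with
    | mk k v =>
      simp only [Z_weighted, List.map_cons, List.sum_cons, ih, PySem.Dict.getD_counter]

lemma sum_if_count (l : List Int) (k v : Int) :
    (l.map (fun z => if z = k then v else 0)).sum = v * (l.count k : Int) := by
  induction l with
  | nil => simp
  | cons z l ih =>
    simp only [List.map_cons, List.sum_cons, List.count_cons, ih]
    by_cases h : z = k <;> simp [h] <;> ring

lemma sum_split (l : List Int) (p : Int × Int) (g : List (Int × Int)) :
    (l.map (oneZ (p :: g))).sum
      = (l.map (fun z => if z = p.1 then p.2 else 0)).sum + (l.map (oneZ g)).sum := by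
  induction l with
  | nil => simp
  | cons z l ihl =>
    simp only [List.map_cons, List.sum_cons, ihl, oneZ]
    ring

lemma fubini (l : List Int) (g : List (Int × Int)) :
    (l.map (oneZ g)).sum = (g.map (fun p => p.2 * (l.count p.1 : Int))).sum := by
  induction g with
  | nil =>
    have h : oneZ ([] : List (Int × Int)) = fun _ => (0 : Int) :=
      funext fun z => by simp [oneZ]
    rw [h]; simp
  | cons p g ih =>
    rw [List.map_cons, List.sum_cons, sum_split, ih, sum_if_count]

-- ===== VERDICT =====
theorem Z_data_spec : Claim_equal_Z_data := by
  intro l g h _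
  show Z_data l g h = Z_data_alt l g h
  simp only [Z_data, Z_data_alt]
  rw [outer_foldl, outer_foldl, weighted_eq_sum, weighted_eq_sum, fubini, fubini]
  simp
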